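-- pv_equiv track=rewrite | github.com/Brelee2222/Sock-puppet-remake | Encode.py | encrint
-- ===== SOURCE A (Python) =====
-- def encrint(integer):
--   integer_ = hex(int(integer))
--   integer = []
--   for i in range((len(integer_)-2+(2*(len(integer_) % 2))) // 2):
--       try:
--         integer.append(int('0x' + integer_[len(integer_)-(2*(i))-2] + integer_[len(integer_)-(2*(i))-1], 0))
--       except:
--           integer.append(int('0x' + integer_[2], 0))
--   integers = []
--   for i in range(len(integer)):
--     integers.append(integer[len(integer)-i-1])
--   integer = integers
--   integers = []
--   for i in integer:
--     integers.append(chr(i))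
--   integer = ''.join([str(t) for t in integers])
--   return integer
-- ===== SOURCE B (Python) =====
-- def encrint(integer):
--     h = '%x' % int(integer)
--     if len(h) % 2:
--         h = '0' + h
--     return ''.join(chr(b) for b in bytes.fromhex(h))
-- ===== Notes on version B (the rewrite author's own statement) =====
-- stated objective: simpler
-- what changed: B pads the '%x' hex string to even length and decodes it front-to-back with bytes.fromhex, replacing A's backward pair-indexing over the '0x...' repr with try/except recovery of the odd leading nibble plus two explicit reversal loops.
import Mathlib
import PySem

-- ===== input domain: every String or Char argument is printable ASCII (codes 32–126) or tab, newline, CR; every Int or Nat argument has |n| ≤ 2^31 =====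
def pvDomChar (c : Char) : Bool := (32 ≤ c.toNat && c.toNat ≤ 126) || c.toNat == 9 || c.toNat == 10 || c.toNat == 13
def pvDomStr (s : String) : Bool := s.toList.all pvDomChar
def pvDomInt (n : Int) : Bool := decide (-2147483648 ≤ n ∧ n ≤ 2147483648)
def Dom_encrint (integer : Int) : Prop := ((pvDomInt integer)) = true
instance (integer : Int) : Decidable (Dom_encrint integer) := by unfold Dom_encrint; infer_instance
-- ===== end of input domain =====

-- B replaces A's backward pair-indexing with try/except and two reversal loops by the
-- standard pad-to-even-then-decode-hex-pairs idiom (objective: simpler). On negative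
-- inputs both Pythons raise ValueError; Pre_ excludes them.

-- shared digit helpers: Python's lowercase hex digits and hex-digit parsing
def hexDigitChars : List Char := ['0','1','2','3','4','5','6','7','8','9','a','b','c','d','e','f']

def hexDig (n : Nat) : Char := hexDigitChars.getD n '0'

-- the lowercase hex digit string of n (no "0x" prefix); exact for n ≥ 0
def hexChars (n : Nat) : List Char :=
  if _h : n < 16 then [hexDig n] else hexChars (n / 16) ++ [hexDig (n % 16)]
decreasing_by exact Nat.div_lt_self (by omega) (by omega)

-- int(s, 0) for s = '0x' + c : the value of one hex digit, none when c is not a hex digit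
def hexVal? (c : Char) : Option Nat :=
  if '0' ≤ c ∧ c ≤ '9' then some (c.toNat - 48)
  else if 'a' ≤ c ∧ c ≤ 'f' then some (c.toNat - 87)
  else if 'A' ≤ c ∧ c ≤ 'F' then some (c.toNat - 55)
  else none

-- ===== PORT A =====
-- one iteration of A's first loop: try int('0x'+s[L-2i-2]+s[L-2i-1],0), except int('0x'+s[2],0)
-- (int('0x'+c1+c2, 0) succeeds iff both chars are hex digits, value 16*v1+v2 — exact);
-- the except branch's own parse always succeeds on the inputs admitted by Pre_ (s[2] is a hex
-- digit), so the .getD 0 default is never used there.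
def aByte (cs : List Char) (L i : Nat) : Nat :=
  let tryv : Option Nat :=
    match cs[L - 2*i - 2]?, cs[L - 2*i - 1]? with
    | some a, some b =>
      match hexVal? a, hexVal? b with
      | some x, some y => some (16*x + y)
      | _, _ => none
    | _, _ => none
  match tryv with
  | some v => v
  | none => (cs[2]?.bind hexVal?).getD 0

-- literal port of A; hex(int(integer)) = "0x" + digits, exact for integer ≥ 0 (Pre_);
-- range(cnt) is ported as List.range cnt (cnt ≥ 0 always holds)
def encrint (integer : Int) : String :=
  let integer_ : List Char := '0' :: 'x' :: hexChars integer.toNat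
  let L := integer_.length
  let bytesA := (List.range ((L - 2 + 2 * (L % 2)) / 2)).map (aByte integer_ L)
  -- second loop: integers.append(integer[len(integer)-i-1])
  let integers := (List.range bytesA.length).map (fun i => bytesA.getD (bytesA.length - i - 1) 0)
  -- chr(i) = Char.ofNat (each value is 16*x+y < 256); ''.join of str(chr) = String.ofList
  String.ofList (integers.map Char.ofNat)

-- ===== PORT B =====
-- bytes.fromhex: consume the (even-length, all-hex-digit) list two chars at a time;
-- the .getD 0 is never used on Pre_ inputs (every char is a hex digit)
def pairBytes : List Char → List Nat
  | a :: b :: rest => (16 * (hexVal? a).getD 0 + (hexVal? b).getD 0) :: pairBytes rest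
  | _ => []

-- literal port of B; '%x' % integer = hexChars, exact for integer ≥ 0 (Pre_)
def encrint_alt (integer : Int) : String :=
  let h := hexChars integer.toNat
  let h := if h.length % 2 = 1 then '0' :: h else h
  String.ofList ((pairBytes h).map Char.ofNat)

-- ===== PRECONDITION & SPEC =====
-- Pre_ excludes exactly the negative inputs, on which A raises ValueError (its except
-- branch re-parses '0x'+'x', an invalid literal); B also raises ValueError there.
def Pre_encrint (integer : Int) : Prop := 0 ≤ integer
instance (integer : Int) : Decidable (Pre_encrint integer) := by unfold Pre_encrint; infer_instance
def pvWitness_encrint : Int := 255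

def Spec_encrint (integer : Int) (out : String) : Prop := out = encrint_alt integer
instance (integer : Int) (out : String) : Decidable (Spec_encrint integer out) := by unfold Spec_encrint; infer_instance

-- ===== CLAIM (what is proved, stated in full; the proofs are below) =====
def Claim_equal_encrint : Prop := ∀ (integer : Int), Dom_encrint integer → Pre_encrint integer → Spec_encrint integer (encrint integer)

-- ===== LEMMAS AND PROOFS =====

-- every digit hexChars emits parses back as a hex digit
lemma hexVal?_mem_digits {c : Char} (h : c ∈ hexDigitChars) : (hexVal? c).isSome := by
  fin_cases h <;> decide

lemma hexDig_mem (n : Nat) : hexDig n ∈ hexDigitChars := by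
  unfold hexDig
  rcases lt_or_ge n hexDigitChars.length with h | h
  · simp [List.getD, List.getElem?_eq_getElem h, List.getElem_mem h]
  · simp [List.getD, List.getElem?_eq_none_iff.2 h]; decide

lemma hexChars_all_hex (n : Nat) : ∀ c ∈ hexChars n, (hexVal? c).isSome := by
  induction n using Nat.strong_induction_on with
  | _ n ih =>
    intro c hc
    rw [hexChars] at hc
    split at hc
    · simp at hc; subst hc; exact hexVal?_mem_digits (hexDig_mem _)
    · rcases List.mem_append.1 hc with h | h
      · exact ih (n / 16) (Nat.div_lt_self (by omega) (by omega)) c h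
      · simp at h; subst h; exact hexVal?_mem_digits (hexDig_mem _)

lemma hexChars_ne_nil (n : Nat) : hexChars n ≠ [] := by
  rw [hexChars]; split <;> simp

-- the i-th byte counted from the back of an (even-length) hex-digit list
def pairAtBack (q : List Char) (i : Nat) : Nat :=
  16 * (hexVal? (q.getD (q.length - 2*i - 2) '0')).getD 0
    + (hexVal? (q.getD (q.length - 2*i - 1) '0')).getD 0

lemma getD_mem (l : List Char) (k : Nat) (h : k < l.length) : l.getD k '0' ∈ l := by
  rw [List.getD_eq_getElem _ _ h]; exact List.getElem_mem h

lemma getD_cons_cons (a b : Char) (l : List Char) (k : Nat) (hk : 2 ≤ k) :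
    (a :: b :: l).getD k '0' = l.getD (k - 2) '0' := by
  obtain ⟨m, rfl⟩ : ∃ m, k = m + 2 := ⟨k - 2, by omega⟩
  simp [List.getD]

-- core: mapping pairAtBack over range and reversing gives front-to-back pair decoding
lemma core (q : List Char) (he : q.length % 2 = 0) :
    (List.range (q.length / 2)).map (pairAtBack q) = (pairBytes q).reverse := by
  induction q using pairBytes.induct with
  | case1 a b rest ih =>
    have hre : rest.length % 2 = 0 := by simp at he; omega
    have hlen : (a :: b :: rest).length / 2 = rest.length / 2 + 1 := by
      simp; omega
    rw [hlen, List.range_succ, List.map_append]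
    simp only [List.map_cons, List.map_nil]
    have h1 : (List.range (rest.length / 2)).map (pairAtBack (a :: b :: rest))
        = (List.range (rest.length / 2)).map (pairAtBack rest) := by
      apply List.map_congr_left
      intro i hi
      have hi' : i < rest.length / 2 := List.mem_range.1 hi
      unfold pairAtBack
      have h2 : (a :: b :: rest).length - 2*i - 2 = (rest.length - 2*i - 2) + 2 := by
        simp; omega
      have h3 : (a :: b :: rest).length - 2*i - 1 = (rest.length - 2*i - 1) + 2 := by
        simp; omega
      rw [h2, h3, getD_cons_cons _ _ _ _ (by omega), getD_cons_cons _ _ _ _ (by omega)]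
      simp
    have h4 : pairAtBack (a :: b :: rest) (rest.length / 2)
        = 16 * (hexVal? a).getD 0 + (hexVal? b).getD 0 := by
      unfold pairAtBack
      have e1 : (a :: b :: rest).length - 2*(rest.length/2) - 2 = 0 := by simp; omega
      have e2 : (a :: b :: rest).length - 2*(rest.length/2) - 1 = 1 := by simp; omega
      rw [e1, e2]; rfl
    rw [h1, ih hre, h4]
    simp [pairBytes]
  | case2 q h =>
    cases q with
    | nil => simp [pairBytes]
    | cons a t =>
      cases t with
      | nil => simp at he
      | cons b r => exact absurd rfl (h a b r)

-- the try-branch of aByte on two in-range characters, reduced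
lemma match2_some (a b : Char) :
    (match some a, some b with
     | some a', some b' =>
       match hexVal? a', hexVal? b' with
       | some x, some y => some (16*x + y)
       | _, _ => none
     | _, _ => (none : Option Nat)) =
    (match hexVal? a, hexVal? b with
     | some x, some y => some (16*x + y)
     | _, _ => none) := rfl

-- A's per-index byte equals pairAtBack of the padded digit list
lemma abyte_eq (ds : List Char) (hds : ∀ c ∈ ds, (hexVal? c).isSome)
    (hne : ds ≠ []) (i : Nat)
    (hi : i < (ds.length + 2*(ds.length % 2)) / 2) :
    aByte ('0' :: 'x' :: ds) (ds.length + 2) i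
      = pairAtBack (if ds.length % 2 = 1 then '0' :: ds else ds) i := by
  have hm : 1 ≤ ds.length := List.length_pos_iff.2 hne
  rcases Nat.even_or_odd ds.length with hpar | hpar
  · -- even length: every pair lies in the digits, try always succeeds
    have hp2 : ds.length % 2 = 0 := Nat.even_iff.1 hpar
    have hi' : 2*i + 2 ≤ ds.length := by omega
    rw [if_neg (by omega)]
    set m := ds.length with hmdef
    have e1 : m + 2 - 2*i - 2 = (m - 2*i - 2) + 2 := by omega
    have e2 : m + 2 - 2*i - 1 = (m - 2*i - 1) + 2 := by omega
    have g1 : ('0' :: 'x' :: ds)[m + 2 - 2*i - 2]? = ds[m - 2*i - 2]? := by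
      rw [e1]; rfl
    have g2 : ('0' :: 'x' :: ds)[m + 2 - 2*i - 1]? = ds[m - 2*i - 1]? := by
      rw [e2]; rfl
    have lt1 : m - 2*i - 2 < m := by omega
    have lt2 : m - 2*i - 1 < m := by omega
    have ga : ds[m - 2*i - 2]? = some (ds.getD (m - 2*i - 2) '0') := by
      simp [List.getD, List.getElem?_eq_getElem lt1]
    have gb : ds[m - 2*i - 1]? = some (ds.getD (m - 2*i - 1) '0') := by
      simp [List.getD, List.getElem?_eq_getElem lt2]
    have ha := hds _ (getD_mem _ _ lt1)
    have hb := hds _ (getD_mem _ _ lt2)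
    obtain ⟨x, hx⟩ := Option.isSome_iff_exists.1 ha
    obtain ⟨y, hy⟩ := Option.isSome_iff_exists.1 hb
    unfold aByte pairAtBack
    rw [g1, g2, ga, gb, match2_some, hx, hy]
    simp
  · have hp2 : ds.length % 2 = 1 := Nat.odd_iff.1 hpar
    rw [if_pos hp2]
    set m := ds.length with hmdef
    by_cases htop : 2*i + 1 = m
    · -- top byte: s[1] = 'x' is not a hex digit, the except branch yields the first digit
      obtain ⟨d0, rest, rfl⟩ : ∃ d0 rest, ds = d0 :: rest := by
        cases ds with | nil => exact absurd rfl hne | cons a l => exact ⟨a, l, rfl⟩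
      have e1 : m + 2 - 2*i - 2 = 1 := by omega
      have e2 : m + 2 - 2*i - 1 = 2 := by omega
      have hd0 := hds d0 (by simp)
      obtain ⟨x, hx⟩ := Option.isSome_iff_exists.1 hd0
      unfold aByte pairAtBack
      rw [e1, e2]
      have p1 : ('0' :: d0 :: rest).length - 2*i - 2 = 0 := by simp at hmdef ⊢; omega
      have p2 : ('0' :: d0 :: rest).length - 2*i - 1 = 1 := by simp at hmdef ⊢; omega
      rw [p1, p2]
      simp [hexVal?]
    · -- inner byte of the odd case
      have hi' : 2*i + 2 ≤ m - 1 := by omega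
      have e1 : m + 2 - 2*i - 2 = (m - 2*i - 2) + 2 := by omega
      have e2 : m + 2 - 2*i - 1 = (m - 2*i - 1) + 2 := by omega
      have g1 : ('0' :: 'x' :: ds)[m + 2 - 2*i - 2]? = ds[m - 2*i - 2]? := by
        rw [e1]; rfl
      have g2 : ('0' :: 'x' :: ds)[m + 2 - 2*i - 1]? = ds[m - 2*i - 1]? := by
        rw [e2]; rfl
      have lt1 : m - 2*i - 2 < m := by omega
      have lt2 : m - 2*i - 1 < m := by omega
      have ga : ds[m - 2*i - 2]? = some (ds.getD (m - 2*i - 2) '0') := by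
        simp [List.getD, List.getElem?_eq_getElem lt1]
      have gb : ds[m - 2*i - 1]? = some (ds.getD (m - 2*i - 1) '0') := by
        simp [List.getD, List.getElem?_eq_getElem lt2]
      have ha := hds _ (getD_mem _ _ lt1)
      have hb := hds _ (getD_mem _ _ lt2)
      obtain ⟨x, hx⟩ := Option.isSome_iff_exists.1 ha
      obtain ⟨y, hy⟩ := Option.isSome_iff_exists.1 hb
      have q1 : ('0' :: ds).length - 2*i - 2 = (m - 2*i - 2) + 1 := by simp [hmdef]; omega
      have q2 : ('0' :: ds).length - 2*i - 1 = (m - 2*i - 1) + 1 := by simp [hmdef]; omega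
      unfold aByte pairAtBack
      rw [g1, g2, ga, gb, match2_some, q1, q2, List.getD_cons_succ, List.getD_cons_succ,
        hx, hy]
      simp

-- A's second loop is List.reverse
lemma range_map_getD_reverse (l : List Nat) :
    (List.range l.length).map (fun i => l.getD (l.length - i - 1) 0) = l.reverse := by
  apply List.ext_getElem
  · simp
  · intro i h1 h2
    simp only [List.getElem_map, List.getElem_range, List.getElem_reverse]
    have hi : i < l.length := by simpa using h1
    rw [List.getD_eq_getElem _ _ (by omega)]
    congr 1
    omega

-- ===== VERDICT (by name: the statement is the Claim_ definition above) =====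
theorem encrint_spec : Claim_equal_encrint := by
  intro integer _ hpre
  unfold Spec_encrint encrint encrint_alt
  set n := integer.toNat with hn
  set ds := hexChars n with hds
  have hne := hexChars_ne_nil n
  have hhex := hexChars_all_hex n
  set p : List Char := if ds.length % 2 = 1 then '0' :: ds else ds with hp
  have hlen : ('0' :: 'x' :: ds).length = ds.length + 2 := by simp
  have hmod : (ds.length + 2) % 2 = ds.length % 2 := by omega
  have hcnt : (ds.length + 2 - 2 + 2 * ((ds.length + 2) % 2)) / 2 = p.length / 2 := by
    rw [hp]; split
    · simp only [List.length_cons]; omega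
    · omega
  have hpe : p.length % 2 = 0 := by
    rw [hp]; split
    · simp only [List.length_cons]; omega
    · omega
  have hbytes : (List.range ((('0' :: 'x' :: ds).length - 2 + 2 * (('0' :: 'x' :: ds).length % 2)) / 2)).map
      (aByte ('0' :: 'x' :: ds) ('0' :: 'x' :: ds).length) = (pairBytes p).reverse := by
    rw [hlen, hcnt, ← core p hpe]
    apply List.map_congr_left
    intro i hi
    rw [hp]
    exact abyte_eq ds hhex hne i
      (by
        have := List.mem_range.1 hi
        rw [hp] at this; revert this; split <;> simp <;> omega)
  simp only [hbytes, range_map_getD_reverse, List.reverse_reverse, hp]
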